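-- pv_equiv track=rewrite | github.com/std-modelware/polytech-diskrete-2020 | Alexey Burkov/Lab2/main.py | next_sequence
-- ===== SOURCE A (Python) =====
-- def next_sequence(sequence):
--     ones_skipped = 0
--     for i in range(len(sequence) - 1, -1, -1):
--         if sequence[i] == 1:
--             if (i != len(sequence) - 1) and (sequence[i + 1] == 0):
--                 sequence[i] = 0
--                 sequence[i + 1] = 1
--                 for j in range(i + 2, len(sequence)):
--                     if ones_skipped:
--                         sequence[j] = 1
--                         ones_skipped -= 1
--                     else:
--                         sequence[j] = 0
--                 return sequence
--             else:
--                 ones_skipped += 1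
--     return []
-- ===== SOURCE B (Python) =====
-- def next_sequence(sequence):
--     n = len(sequence)
--     ones = [i for i, v in enumerate(sequence) if v == 1]
--     movable = [i for i in ones if i + 1 < n and sequence[i + 1] == 0]
--     if not movable:
--         return []
--     p = movable[-1]
--     k = len([i for i in ones if i > p])
--     sequence[p:] = [0] * (n - p)
--     for j in [p + 1] + list(range(p + 2, p + 2 + k)):
--         sequence[j] = 1
--     return sequence
-- ===== Notes on version B (the rewrite author's own statement) =====
-- stated objective: alternative
-- what changed: B recasts the sequence as its list of one-positions (a combination): it builds ones=[i for i,v in enumerate(seq) if v==1] and a forward-filtered list of movable positions, takes the last movable one as pivot, counts the ones to its right by filtering the index list, and rewrites the suffix by a zero slice-assignment followed by setting the new one-positions; A instead does one reverse scan with ones_skipped bookkeeping and an element-by-element fill loop with early return.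
import Mathlib
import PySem

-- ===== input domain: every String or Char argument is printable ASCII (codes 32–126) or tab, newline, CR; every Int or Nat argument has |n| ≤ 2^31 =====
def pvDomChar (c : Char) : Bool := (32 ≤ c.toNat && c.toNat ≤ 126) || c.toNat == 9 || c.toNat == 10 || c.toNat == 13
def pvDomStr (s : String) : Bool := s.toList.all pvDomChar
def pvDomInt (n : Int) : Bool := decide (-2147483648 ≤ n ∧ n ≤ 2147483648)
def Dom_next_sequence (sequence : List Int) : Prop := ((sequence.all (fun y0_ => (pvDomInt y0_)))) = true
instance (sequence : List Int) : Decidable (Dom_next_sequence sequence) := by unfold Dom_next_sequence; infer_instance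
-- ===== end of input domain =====

-- B recasts the sequence as its list of one-positions: forward-built ones/movable index
-- lists, last movable position as pivot, a filter count of the ones to its right, and a
-- zero slice-assignment plus one-setting pass (objective: alternative).
-- A mutates its argument in place on success; the equivalence proved here is about the
-- RETURN value only (B in Python performs the same mutation).

-- ===== PORT A =====
-- inner 'for j in range(i+2, len(sequence))' fill loop of A
def nsFill (seq : List Int) (js : List Int) (skipped : Int) : List Int :=
  match js with
  | [] => seq
  | j :: rest =>
    if skipped ≠ 0 then nsFill (PySem.List.pySetD seq j 1) rest (skipped - 1)
    else nsFill (PySem.List.pySetD seq j 0) rest skipped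

-- outer 'for i in range(len(sequence)-1, -1, -1)' loop of A (early return on pivot)
def nsLoop (seq : List Int) (is_ : List Int) (skipped : Int) : List Int :=
  match is_ with
  | [] => []
  | i :: rest =>
    if PySem.List.pyGetD seq i 0 = 1 then
      if i ≠ (seq.length : Int) - 1 ∧ PySem.List.pyGetD seq (i + 1) 0 = 0 then
        let s1 := PySem.List.pySetD (PySem.List.pySetD seq i 0) (i + 1) 1
        nsFill s1 (PySem.List.pyRange (i + 2) (s1.length : Int)) skipped
      else nsLoop seq rest (skipped + 1)
    else nsLoop seq rest skipped

def next_sequence (sequence : List Int) : List Int :=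
  nsLoop sequence (PySem.List.pyRange ((sequence.length : Int) - 1) (-1) (-1)) 0

-- ===== PORT B =====
def next_sequence_alt (sequence : List Int) : List Int :=
  let n : Int := sequence.length
  -- ones = [i for i, v in enumerate(sequence) if v == 1]
  let ones := ((PySem.List.enumerate sequence 0).filter (fun iv => iv.2 == 1)).map (fun iv => iv.1)
  -- movable = [i for i in ones if i + 1 < n and sequence[i + 1] == 0]
  let movable := ones.filter (fun i => decide (i + 1 < n) && (PySem.List.pyGetD sequence (i + 1) 0 == 0))
  if movable = [] then []
  else
    -- p = movable[-1]
    let p := PySem.List.pyGetD movable (-1) 0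
    -- k = len([i for i in ones if i > p])
    let k : Int := ((ones.filter (fun i => decide (p < i))).length : Int)
    -- sequence[p:] = [0] * (n - p)
    let s1 := sequence.take p.toNat ++ List.replicate (n - p).toNat 0
    -- for j in [p + 1] + list(range(p + 2, p + 2 + k)): sequence[j] = 1
    ((p + 1) :: PySem.List.pyRange (p + 2) (p + 2 + k)).foldl
      (fun acc j => PySem.List.pySetD acc j 1) s1

-- ===== PRECONDITION & SPEC =====
def Spec_next_sequence (sequence : List Int) (out : List Int) : Prop := out = next_sequence_alt sequence
instance (sequence : List Int) (out : List Int) : Decidable (Spec_next_sequence sequence out) := by unfold Spec_next_sequence; infer_instance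

-- ===== CLAIM (what is proved, stated in full; the proofs are below) =====
def Claim_equal_next_sequence : Prop := ∀ (sequence : List Int), Dom_next_sequence sequence → Spec_next_sequence sequence (next_sequence sequence)

-- ===== LEMMAS AND PROOFS =====

-- proof-only middle form: rightmost movable index by a descending index scan, then the
-- closed suffix shape; both ports are proved equal to this
def nsAltPivot (seq : List Int) (is_ : List Int) : Int :=
  match is_ with
  | [] => -1
  | i :: rest =>
    if PySem.List.pyGetD seq i 0 = 1 ∧ PySem.List.pyGetD seq (i + 1) 0 = 0 then i
    else nsAltPivot seq rest

def nsMid (sequence : List Int) : List Int :=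
  let n : Int := sequence.length
  let p := nsAltPivot sequence (PySem.List.pyRange (n - 2) (-1) (-1))
  if p = -1 then []
  else
    let ones : Int := PySem.List.count (PySem.List.slice sequence (some (p + 1)) none) 1
    sequence.take p.toNat ++
      ([0, 1] ++ List.replicate ones.toNat 1 ++ List.replicate (n - p - 2 - ones).toNat 0)

-- number of ones among indices [a, b) of seq
def cntOnes (seq : List Int) (a b : Int) : Int :=
  (((PySem.List.pyRange a b).countP (fun j => PySem.List.pyGetD seq j 0 == 1) : Nat) : Int)

lemma cntOnes_nonneg (seq : List Int) (a b : Int) : 0 ≤ cntOnes seq a b := by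
  simp [cntOnes]

lemma cntOnes_empty (seq : List Int) (a : Int) : cntOnes seq a a = 0 := by
  simp [cntOnes, PySem.List.pyRange_one_eq_nil le_rfl]

lemma cntOnes_cons (seq : List Int) {a b : Int} (h : a < b) :
    cntOnes seq a b = (if PySem.List.pyGetD seq a 0 = 1 then 1 else 0) + cntOnes seq (a + 1) b := by
  simp only [cntOnes, PySem.List.pyRange_one_cons h, List.countP_cons]
  by_cases h1 : PySem.List.pyGetD seq a 0 = 1
  · simp only [h1, BEq.rfl, if_pos trivial]
    push_cast
    ring
  · simp [h1]

lemma cntOnes_le (seq : List Int) {a b : Int} (hab : a ≤ b) : cntOnes seq a b ≤ b - a := by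
  have h := List.countP_le_length (l := PySem.List.pyRange a b)
            (p := fun j => PySem.List.pyGetD seq j 0 == 1)
  simp only [PySem.List.length_pyRange_one] at h
  simp only [cntOnes]
  omega

lemma cntOnes_eq_count (seq : List Int) {a : Int} (ha : 0 ≤ a) :
    cntOnes seq a (seq.length : Int)
      = (PySem.List.count (PySem.List.slice seq (some a) none) 1 : Int) := by
  have h2 : ((PySem.List.pyRange a (PySem.List.len seq)).map
        (fun j => PySem.List.pyGetD seq j 0)).countP (fun x => x == 1)
      = (List.drop a.toNat seq).countP (fun x => x == 1) := by
    rw [PySem.List.map_pyGetD_pyRange seq 0 ha]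
  rw [List.countP_map] at h2
  simp only [Function.comp_def] at h2
  simp only [cntOnes, PySem.List.count, PySem.List.slice_from seq ha, PySem.List.len] at *
  rw [h2, List.count_eq_countP]

lemma take_set_succ (l : List Int) (i : Nat) (v : Int) (h : i < l.length) :
    (l.set i v).take (i + 1) = l.take i ++ [v] := by
  rw [List.set_eq_take_append_cons_drop, if_pos h]
  have hl : (l.take i).length = i := List.length_take_of_le h.le
  rw [show i + 1 = (l.take i).length + 1 from by rw [hl]]
  rw [List.take_append]
  simp

lemma nsFill_eq : ∀ (m : Nat) (seq : List Int) (a s : Int), 0 ≤ a →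
    a + (m : Int) = (seq.length : Int) → 0 ≤ s → s ≤ (m : Int) →
    nsFill seq (PySem.List.pyRange a (seq.length : Int)) s
      = seq.take a.toNat ++ List.replicate s.toNat 1 ++ List.replicate ((m : Int) - s).toNat 0 := by
  intro m
  induction m with
  | zero =>
    intro seq a s ha hlen hs hsm
    have hs0 : s = 0 := le_antisymm (by exact_mod_cast hsm) hs
    subst hs0
    rw [PySem.List.pyRange_one_eq_nil (by omega)]
    simp only [nsFill]
    rw [List.take_of_length_le (by omega)]
    simp
  | succ m ih =>
    intro seq a s ha hlen hs hsm
    have halt : a < (seq.length : Int) := by omega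
    have haN : a.toNat < seq.length := by omega
    have hto : (a + 1).toNat = a.toNat + 1 := by omega
    rw [PySem.List.pyRange_one_cons halt]
    by_cases hzero : s = 0
    · subst hzero
      simp only [nsFill]
      rw [if_neg (show ¬((0:Int) ≠ 0) by decide)]
      rw [PySem.List.pySetD_of_nonneg seq 0 ha]
      have hlen' : ((seq.set a.toNat 0).length : Int) = (seq.length : Int) := by simp
      have := ih (seq.set a.toNat 0) (a + 1) 0 (by omega) (by rw [List.length_set]; omega) le_rfl (by omega)
      rw [hlen'] at this
      rw [this, hto, take_set_succ seq a.toNat 0 haN]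
      simp [List.replicate_succ]
    · simp only [nsFill, ne_eq, hzero, not_false_eq_true, if_pos]
      rw [PySem.List.pySetD_of_nonneg seq 1 ha]
      have hlen' : ((seq.set a.toNat 1).length : Int) = (seq.length : Int) := by simp
      have := ih (seq.set a.toNat 1) (a + 1) (s - 1) (by omega) (by rw [List.length_set]; omega) (by omega) (by omega)
      rw [hlen'] at this
      rw [this, hto, take_set_succ seq a.toNat 1 haN]
      have hr1 : s.toNat = (s - 1).toNat + 1 := by omega
      simp only [hr1, List.replicate_succ, List.append_assoc, List.singleton_append]
      simp
      omega

-- main loop invariant: scanning down from k = m-1 with skipped = ones above k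
lemma nsLoop_eq : ∀ (m : Nat) (seq : List Int), (m : Int) ≤ (seq.length : Int) - 1 →
    nsLoop seq (PySem.List.pyRange ((m : Int) - 1) (-1) (-1)) (cntOnes seq (m : Int) (seq.length : Int))
      = (let p := nsAltPivot seq (PySem.List.pyRange ((m : Int) - 1) (-1) (-1))
         if p = -1 then []
         else
           let ones : Int := PySem.List.count (PySem.List.slice seq (some (p + 1)) none) 1
           seq.take p.toNat ++
             ([0, 1] ++ List.replicate ones.toNat 1 ++
               List.replicate ((seq.length : Int) - p - 2 - ones).toNat 0)) := by
  intro m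
  induction m with
  | zero =>
    intro seq _
    rw [show ((0 : Nat) : Int) - 1 = -1 by norm_num, PySem.List.pyRange_neg_one_eq_nil le_rfl]
    simp [nsLoop, nsAltPivot]
  | succ m ih =>
    intro seq hm
    have e1 : ((m + 1 : Nat) : Int) - 1 = (m : Int) := by push_cast; ring
    rw [e1]
    have hmlt : (m : Int) < (seq.length : Int) - 1 := by push_cast at hm; omega
    have hcons : PySem.List.pyRange ((m : Int)) (-1) (-1)
        = (m : Int) :: PySem.List.pyRange ((m : Int) - 1) (-1) (-1) :=
      PySem.List.pyRange_neg_one_cons (by omega)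
    rw [hcons]
    by_cases h1 : PySem.List.pyGetD seq (m : Int) 0 = 1
    · by_cases h2 : PySem.List.pyGetD seq ((m : Int) + 1) 0 = 0
      · have hp : nsAltPivot seq ((m : Int) :: PySem.List.pyRange ((m : Int) - 1) (-1) (-1))
            = (m : Int) := by
          simp only [nsAltPivot]
          rw [if_pos (show PySem.List.pyGetD seq (m : Int) 0 = 1 ∧
            PySem.List.pyGetD seq ((m : Int) + 1) 0 = 0 from ⟨h1, h2⟩)]
        simp only [nsLoop, hp]
        rw [if_pos h1]
        rw [if_pos (show (m : Int) ≠ (seq.length : Int) - 1 ∧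
              PySem.List.pyGetD seq ((m : Int) + 1) 0 = 0 from ⟨by omega, h2⟩)]
        rw [if_neg (show ¬(m : Int) = -1 by omega)]
        have hlen2 : (m : Int) + 2 ≤ (seq.length : Int) := by omega
        have hmN : m < seq.length := by omega
        have hm1N : m + 1 < seq.length := by omega
        have hones : (PySem.List.count (PySem.List.slice seq (some ((m : Int) + 1)) none) 1 : Int)
            = cntOnes seq ((m : Int) + 1) (seq.length : Int) :=
          (cntOnes_eq_count seq (by omega)).symm
        have hcnt2 : cntOnes seq ((m : Int) + 1) (seq.length : Int)
            = cntOnes seq ((m : Int) + 2) (seq.length : Int) := by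
          rw [cntOnes_cons seq (show (m : Int) + 1 < (seq.length : Int) by omega),
            if_neg (by rw [h2]; decide)]
          rw [show (m : Int) + 1 + 1 = (m : Int) + 2 by ring]
          omega
        have hbound : cntOnes seq ((m : Int) + 1) (seq.length : Int)
            ≤ (seq.length : Int) - ((m : Int) + 2) := by
          rw [hcnt2]; exact cntOnes_le seq hlen2
        have hpos : 0 ≤ cntOnes seq ((m : Int) + 1) (seq.length : Int) := cntOnes_nonneg _ _ _
        rw [PySem.List.pySetD_of_nonneg seq 0 (by omega),
          PySem.List.pySetD_of_nonneg _ 1 (by omega)]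
        have hslen : ((((seq.set (m : Int).toNat 0).set ((m : Int) + 1).toNat 1).length : Nat) : Int)
            = (seq.length : Int) := by simp
        rw [hslen]
        have hskip : cntOnes seq ((m + 1 : Nat) : Int) (seq.length : Int)
            = cntOnes seq ((m : Int) + 1) (seq.length : Int) := by
          rw [Nat.cast_add, Nat.cast_one]
        rw [hskip]
        have hfill := nsFill_eq ((seq.length - (m + 2) : Nat))
          ((seq.set (m : Int).toNat 0).set ((m : Int) + 1).toNat 1)
          ((m : Int) + 2) (cntOnes seq ((m : Int) + 1) (seq.length : Int))
          (by omega) (by simp; omega) hpos (by omega)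
        simp only [List.length_set] at hfill
        rw [hfill]
        have htoN1 : ((m : Int) + 1).toNat = m + 1 := by omega
        have htoN2 : ((m : Int) + 2).toNat = m + 2 := by omega
        have htoN0 : ((m : Int)).toNat = m := by omega
        rw [htoN1, htoN2, htoN0]
        have htk : ((seq.set m 0).set (m + 1) 1).take (m + 2)
            = seq.take m ++ [0, 1] := by
          have h := take_set_succ (seq.set m 0) (m + 1) 1 (by simpa using hm1N)
          rw [show m + 2 = (m + 1) + 1 from rfl, h, take_set_succ seq m 0 hmN]
          simp
        rw [htk, ← hones]
        have hcast : ((seq.length - (m + 2) : Nat) : Int)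
            - (PySem.List.count (PySem.List.slice seq (some ((m : Int) + 1)) none) 1 : Int)
            = (seq.length : Int) - (m : Int) - 2
            - (PySem.List.count (PySem.List.slice seq (some ((m : Int) + 1)) none) 1 : Int) := by
          omega
        rw [hcast]
        simp [List.append_assoc]
      · have hp : nsAltPivot seq ((m : Int) :: PySem.List.pyRange ((m : Int) - 1) (-1) (-1))
            = nsAltPivot seq (PySem.List.pyRange ((m : Int) - 1) (-1) (-1)) := by
          simp only [nsAltPivot]
          rw [if_neg (fun h => h2 h.2)]
        simp only [nsLoop, hp]
        rw [if_pos h1]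
        rw [if_neg (show ¬((m : Int) ≠ (seq.length : Int) - 1 ∧
              PySem.List.pyGetD seq ((m : Int) + 1) 0 = 0) from fun h => h2 h.2)]
        have hs : cntOnes seq ((m + 1 : Nat) : Int) (seq.length : Int) + 1
            = cntOnes seq ((m : Int)) (seq.length : Int) := by
          rw [cntOnes_cons seq (show (m : Int) < (seq.length : Int) by omega), if_pos h1]
          rw [Nat.cast_add, Nat.cast_one]
          omega
        rw [hs]
        exact ih seq (by omega)
    · have hp : nsAltPivot seq ((m : Int) :: PySem.List.pyRange ((m : Int) - 1) (-1) (-1))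
          = nsAltPivot seq (PySem.List.pyRange ((m : Int) - 1) (-1) (-1)) := by
        simp only [nsAltPivot]
        rw [if_neg (fun h => h1 h.1)]
      simp only [nsLoop, hp]
      rw [if_neg h1]
      have hs : cntOnes seq ((m + 1 : Nat) : Int) (seq.length : Int)
          = cntOnes seq ((m : Int)) (seq.length : Int) := by
        rw [cntOnes_cons seq (show (m : Int) < (seq.length : Int) by omega), if_neg h1]
        rw [Nat.cast_add, Nat.cast_one]
        omega
      rw [hs]
      exact ih seq (by omega)

-- A equals the middle form
lemma aEqMid (seq : List Int) : next_sequence seq = nsMid seq := by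
  unfold next_sequence nsMid
  by_cases h0 : seq = []
  · subst h0; decide
  · have h1 : 1 ≤ seq.length := List.length_pos_of_ne_nil h0
    have hcons : PySem.List.pyRange ((seq.length : Int) - 1) (-1) (-1)
        = ((seq.length : Int) - 1) :: PySem.List.pyRange ((seq.length : Int) - 1 - 1) (-1) (-1) :=
      PySem.List.pyRange_neg_one_cons (by omega)
    rw [hcons, show (seq.length : Int) - 1 - 1 = (seq.length : Int) - 2 by ring]
    simp only [nsLoop]
    have hm := nsLoop_eq (seq.length - 1) seq (by omega)
    rw [show ((seq.length - 1 : Nat) : Int) = (seq.length : Int) - 1 by omega] at hm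
    rw [show (seq.length : Int) - 1 - 1 = (seq.length : Int) - 2 by ring] at hm
    by_cases hv : PySem.List.pyGetD seq ((seq.length : Int) - 1) 0 = 1
    · rw [if_pos hv]
      rw [if_neg (show ¬(((seq.length : Int) - 1) ≠ (seq.length : Int) - 1 ∧
            PySem.List.pyGetD seq ((seq.length : Int) - 1 + 1) 0 = 0) from fun h => h.1 rfl)]
      have hc : cntOnes seq ((seq.length : Int) - 1) (seq.length : Int) = 1 := by
        rw [cntOnes_cons seq (show (seq.length : Int) - 1 < (seq.length : Int) by omega),
          if_pos hv, show (seq.length : Int) - 1 + 1 = (seq.length : Int) by ring, cntOnes_empty]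
        norm_num
      rw [hc] at hm
      rw [show (0 : Int) + 1 = 1 from by ring]
      exact hm
    · rw [if_neg hv]
      have hc : cntOnes seq ((seq.length : Int) - 1) (seq.length : Int) = 0 := by
        rw [cntOnes_cons seq (show (seq.length : Int) - 1 < (seq.length : Int) by omega),
          if_neg hv, show (seq.length : Int) - 1 + 1 = (seq.length : Int) by ring, cntOnes_empty]
        norm_num
      rw [hc] at hm
      exact hm

-- ===== B-side lemmas =====

-- B's one-positions list is the index range filtered by value 1
lemma ones_eq (seq : List Int) :
    ((PySem.List.enumerate seq 0).filter (fun iv => iv.2 == 1)).map (fun iv => iv.1)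
      = (PySem.List.pyRange 0 (seq.length : Int)).filter
          (fun j => PySem.List.pyGetD seq j 0 == 1) := by
  rw [PySem.List.enumerate_eq_map_pyRange seq 0]
  rw [List.filter_map, List.map_map]
  simp only [Function.comp_def]
  simp [PySem.List.len]

-- the combined test of the middle form's descending scan
def testA (seq : List Int) (j : Int) : Bool :=
  (PySem.List.pyGetD seq j 0 == 1) && (PySem.List.pyGetD seq (j + 1) 0 == 0)

-- descending scan = last element of the ascending filtered index list
lemma pivot_eq (seq : List Int) : ∀ (m : Nat),
    nsAltPivot seq (PySem.List.pyRange ((m : Int) - 1) (-1) (-1))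
      = ((PySem.List.pyRange 0 (m : Int)).filter (testA seq)).getLastD (-1) := by
  intro m
  induction m with
  | zero =>
    rw [show ((0 : Nat) : Int) - 1 = -1 by norm_num, PySem.List.pyRange_neg_one_eq_nil le_rfl,
      show ((0 : Nat) : Int) = 0 by norm_num, PySem.List.pyRange_one_eq_nil le_rfl]
    simp [nsAltPivot]
  | succ m ih =>
    have e1 : ((m + 1 : Nat) : Int) - 1 = (m : Int) := by push_cast; ring
    rw [e1, PySem.List.pyRange_neg_one_cons (by omega)]
    have hsplit : PySem.List.pyRange 0 ((m + 1 : Nat) : Int)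
        = PySem.List.pyRange 0 (m : Int) ++ [(m : Int)] := by
      rw [PySem.List.pyRange_one_append 0 (m : Int) ((m + 1 : Nat) : Int) (by omega)
        (by push_cast; omega)]
      congr 1
      rw [PySem.List.pyRange_one_cons (by push_cast; omega)]
      rw [PySem.List.pyRange_one_eq_nil (by push_cast; omega)]
    rw [hsplit, List.filter_append]
    by_cases ht : testA seq (m : Int) = true
    · have hprop : PySem.List.pyGetD seq (m : Int) 0 = 1 ∧
          PySem.List.pyGetD seq ((m : Int) + 1) 0 = 0 := by
        simp only [testA, Bool.and_eq_true, beq_iff_eq] at ht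
        exact ht
      simp only [nsAltPivot, if_pos hprop]
      simp [ht, List.getLastD_concat]
    · have hprop : ¬(PySem.List.pyGetD seq (m : Int) 0 = 1 ∧
          PySem.List.pyGetD seq ((m : Int) + 1) 0 = 0) := by
        simp only [testA, Bool.and_eq_true, beq_iff_eq] at ht
        exact ht
      rw [Bool.not_eq_true] at ht
      simp only [nsAltPivot, if_neg hprop]
      simp [ht, ih]

-- B's movable list is the ascending index list filtered by the scan test
lemma movable_eq (seq : List Int) :
    ((PySem.List.pyRange 0 (seq.length : Int)).filter
        (fun j => PySem.List.pyGetD seq j 0 == 1)).filter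
        (fun i => decide (i + 1 < (seq.length : Int)) && (PySem.List.pyGetD seq (i + 1) 0 == 0))
      = (PySem.List.pyRange 0 ((seq.length : Int) - 1)).filter (testA seq) := by
  rw [List.filter_filter]
  by_cases h0 : seq = []
  · subst h0; decide
  · have h1 : 1 ≤ seq.length := List.length_pos_of_ne_nil h0
    have hsplit : PySem.List.pyRange 0 (seq.length : Int)
        = PySem.List.pyRange 0 ((seq.length : Int) - 1) ++ [(seq.length : Int) - 1] := by
      rw [PySem.List.pyRange_one_append 0 ((seq.length : Int) - 1) (seq.length : Int)
        (by omega) (by omega)]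
      congr 1
      rw [PySem.List.pyRange_one_cons (by omega)]
      rw [PySem.List.pyRange_one_eq_nil (by omega)]
    rw [hsplit, List.filter_append]
    have hlast : List.filter
        (fun a => decide (a + 1 < (seq.length : Int)) &&
          (PySem.List.pyGetD seq (a + 1) 0 == 0) && (PySem.List.pyGetD seq a 0 == 1))
        [(seq.length : Int) - 1] = [] := by
      simp [show ¬((seq.length : Int) - 1 + 1 < (seq.length : Int)) by omega]
    rw [hlast, List.append_nil]
    apply List.filter_congr
    intro j hj
    have hb := PySem.List.mem_pyRange_one.mp hj
    simp [testA, show j + 1 < (seq.length : Int) by omega, Bool.and_comm]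

-- number of ones strictly right of p = cntOnes on (p+1, n)
lemma k_eq (seq : List Int) (p : Int) (hp : 0 ≤ p) (hpn : p + 1 ≤ (seq.length : Int)) :
    (((PySem.List.pyRange 0 (seq.length : Int)).filter
        (fun j => PySem.List.pyGetD seq j 0 == 1)).filter
        (fun i => decide (p < i))).length
      = (cntOnes seq (p + 1) (seq.length : Int)).toNat := by
  rw [List.filter_filter]
  rw [PySem.List.pyRange_one_append 0 (p + 1) (seq.length : Int) (by omega) hpn]
  rw [List.filter_append, List.length_append]
  have hlow : List.filter
      (fun a => decide (p < a) && (PySem.List.pyGetD seq a 0 == 1))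
      (PySem.List.pyRange 0 (p + 1)) = [] := by
    rw [List.filter_eq_nil_iff]
    intro a ha
    have hb := PySem.List.mem_pyRange_one.mp ha
    simp [show ¬(p < a) by omega]
  have hhigh : List.filter
      (fun a => decide (p < a) && (PySem.List.pyGetD seq a 0 == 1))
      (PySem.List.pyRange (p + 1) (seq.length : Int))
      = List.filter (fun a => PySem.List.pyGetD seq a 0 == 1)
          (PySem.List.pyRange (p + 1) (seq.length : Int)) := by
    apply List.filter_congr
    intro a ha
    have hb := PySem.List.mem_pyRange_one.mp ha
    simp [show p < a by omega]
  rw [hlow, hhigh]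
  simp [cntOnes, List.countP_eq_length_filter]

-- set at the junction of an append
lemma set_append_len (pre : List Int) (x v : Int) (rest : List Int) :
    (pre ++ x :: rest).set pre.length v = pre ++ v :: rest := by
  induction pre with
  | nil => rfl
  | cons a l ih => simp [List.set, ih]

-- setting ones over a replicate-zero block, one index at a time
lemma fillOnes : ∀ (k : Nat) (pre suf : List Int),
    (PySem.List.pyRange ((pre.length : Int)) ((pre.length : Int) + (k : Int))).foldl
      (fun acc j => PySem.List.pySetD acc j 1) (pre ++ List.replicate k 0 ++ suf)
    = pre ++ List.replicate k 1 ++ suf := by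
  intro k
  induction k with
  | zero =>
    intro pre suf
    rw [PySem.List.pyRange_one_eq_nil (by omega)]
    simp
  | succ k ih =>
    intro pre suf
    rw [PySem.List.pyRange_one_cons (by omega)]
    simp only [List.foldl_cons]
    have h1 : PySem.List.pySetD (pre ++ List.replicate (k + 1) 0 ++ suf) ((pre.length : Int)) 1
        = (pre ++ [1]) ++ List.replicate k 0 ++ suf := by
      rw [PySem.List.pySetD_of_nonneg _ 1 (by omega)]
      rw [show ((pre.length : Int)).toNat = pre.length by omega]
      simp only [List.replicate_succ, List.cons_append, List.append_assoc]
      rw [set_append_len]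
      simp
    rw [h1]
    have h2 : PySem.List.pyRange ((pre.length : Int) + 1) ((pre.length : Int) + ((k + 1 : Nat) : Int))
        = PySem.List.pyRange (((pre ++ [1]).length : Int)) (((pre ++ [1]).length : Int) + (k : Int)) := by
      congr 1 <;> simp <;> push_cast <;> ring
    rw [h2, ih (pre ++ [1]) suf]
    simp [List.replicate_succ]

-- the two write passes of B produce the closed suffix shape
lemma build_eq (seq : List Int) (p c : Int) (hp : 0 ≤ p) (hpu : p + 2 ≤ (seq.length : Int))
    (hc0 : 0 ≤ c) (hcb : c ≤ (seq.length : Int) - p - 2) :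
    ((p + 1) :: PySem.List.pyRange (p + 2) (p + 2 + ((c.toNat : Nat) : Int))).foldl
        (fun acc j => PySem.List.pySetD acc j 1)
        (seq.take p.toNat ++ List.replicate ((seq.length : Int) - p).toNat 0)
      = seq.take p.toNat ++
          ([0, 1] ++ List.replicate c.toNat 1 ++
            List.replicate ((seq.length : Int) - p - 2 - c).toNat 0) := by
  have hpre : (seq.take p.toNat).length = p.toNat := List.length_take_of_le (by omega)
  have hsplitr : ((seq.length : Int) - p).toNat
      = 2 + (c.toNat + ((seq.length : Int) - p - 2 - c).toNat) := by omega
  rw [hsplitr, List.replicate_add, List.replicate_add]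
  simp only [List.foldl_cons]
  have h01 : PySem.List.pySetD
      (seq.take p.toNat ++ (List.replicate 2 0 ++
        (List.replicate c.toNat 0 ++ List.replicate ((seq.length : Int) - p - 2 - c).toNat 0)))
      (p + 1) 1
      = (seq.take p.toNat ++ [0, 1]) ++ List.replicate c.toNat 0 ++
          List.replicate ((seq.length : Int) - p - 2 - c).toNat 0 := by
    rw [PySem.List.pySetD_of_nonneg _ 1 (by omega)]
    have e1 : seq.take p.toNat ++ (List.replicate 2 0 ++
        (List.replicate c.toNat 0 ++ List.replicate ((seq.length : Int) - p - 2 - c).toNat 0))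
        = (seq.take p.toNat ++ [0]) ++ (0 :: (List.replicate c.toNat 0 ++
            List.replicate ((seq.length : Int) - p - 2 - c).toNat 0)) := by
      simp [List.replicate_succ]
    rw [e1]
    rw [show (p + 1).toNat = (seq.take p.toNat ++ [0]).length by simp [hpre]; omega]
    rw [set_append_len]
    simp
  rw [show seq.take p.toNat ++ (List.replicate 2 0 ++
        (List.replicate c.toNat 0 ++ List.replicate ((seq.length : Int) - p - 2 - c).toNat 0))
      = seq.take p.toNat ++ List.replicate 2 0 ++
        (List.replicate c.toNat 0 ++ List.replicate ((seq.length : Int) - p - 2 - c).toNat 0)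
    from by simp] at h01 ⊢
  rw [h01]
  have h2 : PySem.List.pyRange (p + 2) (p + 2 + ((c.toNat : Nat) : Int))
      = PySem.List.pyRange (((seq.take p.toNat ++ [0, 1]).length : Int))
          ((((seq.take p.toNat ++ [0, 1]).length : Int)) + ((c.toNat : Nat) : Int)) := by
    congr 1 <;> simp [hpre] <;> omega
  rw [h2]
  have h3 := fillOnes c.toNat (seq.take p.toNat ++ [0, 1])
    (List.replicate ((seq.length : Int) - p - 2 - c).toNat 0)
  rw [show (seq.take p.toNat ++ [0, 1]) ++ List.replicate c.toNat 0 ++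
        List.replicate ((seq.length : Int) - p - 2 - c).toNat 0
      = (seq.take p.toNat ++ [0, 1]) ++ (List.replicate c.toNat 0 ++
        List.replicate ((seq.length : Int) - p - 2 - c).toNat 0) from by simp] at h3 ⊢
  rw [h3]
  simp

-- ===== VERDICT helper: B equals the middle form =====
lemma bEqMid (seq : List Int) : next_sequence_alt seq = nsMid seq := by
  by_cases h0 : seq = []
  · subst h0; decide
  · have h1 : 1 ≤ seq.length := List.length_pos_of_ne_nil h0
    simp only [next_sequence_alt, nsMid, ones_eq, movable_eq]
    have hpiv : nsAltPivot seq (PySem.List.pyRange ((seq.length : Int) - 2) (-1) (-1))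
        = ((PySem.List.pyRange 0 ((seq.length : Int) - 1)).filter (testA seq)).getLastD (-1) := by
      have h := pivot_eq seq (seq.length - 1)
      rw [show ((seq.length - 1 : Nat) : Int) = (seq.length : Int) - 1 by omega] at h
      rw [show (seq.length : Int) - 1 - 1 = (seq.length : Int) - 2 by ring] at h
      exact h
    rw [hpiv]
    by_cases hc : (PySem.List.pyRange 0 ((seq.length : Int) - 1)).filter (testA seq) = []
    · simp [hc]
    · rw [if_neg hc]
      have hgl : ((PySem.List.pyRange 0 ((seq.length : Int) - 1)).filter (testA seq)).getLastD (-1)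
          = ((PySem.List.pyRange 0 ((seq.length : Int) - 1)).filter (testA seq)).getLast hc := by
        rw [List.getLastD_eq_getLast?, List.getLast?_eq_some_getLast hc]
        rfl
      rw [hgl, PySem.List.pyGetD_neg_one _ 0 hc]
      set p := ((PySem.List.pyRange 0 ((seq.length : Int) - 1)).filter (testA seq)).getLast hc
        with hpdef
      have hmem : p ∈ (PySem.List.pyRange 0 ((seq.length : Int) - 1)).filter (testA seq) :=
        List.getLast_mem hc
      have hmem' := List.mem_filter.mp hmem
      have hb := PySem.List.mem_pyRange_one.mp hmem'.1
      have hp0 : 0 ≤ p := hb.1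
      have hpu : p < (seq.length : Int) - 1 := hb.2
      have hz : PySem.List.pyGetD seq (p + 1) 0 = 0 := by
        have ht := hmem'.2
        simp only [testA, Bool.and_eq_true, beq_iff_eq] at ht
        exact ht.2
      rw [if_neg (show ¬(p = -1) by omega)]
      rw [k_eq seq p hp0 (by omega)]
      have hcnt : (PySem.List.count (PySem.List.slice seq (some (p + 1)) none) 1 : Int)
          = cntOnes seq (p + 1) (seq.length : Int) := (cntOnes_eq_count seq (by omega)).symm
      have hc2 : cntOnes seq (p + 1) (seq.length : Int) = cntOnes seq (p + 2) (seq.length : Int) := by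
        rw [cntOnes_cons seq (show p + 1 < (seq.length : Int) by omega), if_neg (by rw [hz]; decide),
          show p + 1 + 1 = p + 2 by ring]
        omega
      have hcb : cntOnes seq (p + 1) (seq.length : Int) ≤ (seq.length : Int) - p - 2 := by
        rw [hc2]
        have := cntOnes_le seq (show p + 2 ≤ (seq.length : Int) by omega)
        omega
      rw [hcnt]
      exact build_eq seq p (cntOnes seq (p + 1) (seq.length : Int)) hp0 (by omega)
        (cntOnes_nonneg _ _ _) hcb

-- ===== VERDICT (by name: the statement is the Claim_ definition above) =====
theorem next_sequence_spec : Claim_equal_next_sequence := by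
  unfold Claim_equal_next_sequence
  intro seq _
  unfold Spec_next_sequence
  rw [aEqMid, bEqMid]
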